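-- pv_equiv track=rewrite | github.com/btrif/Python_dev_repo | Project EULER/pb418 Factorisation triples.py | sub_products
-- ===== SOURCE A (Python) =====
-- def sub_products(factors):
--   # Helper function for the meet-in-the-middle function, closest_divisors
--   L = len(factors) // 2
--   F_1 = factors[:L]
--   F_2 = factors[L:]
--
--   P_1 = [1]
--   for p in F_1:
--     P_1.extend([x * p for x in set(P_1)])
--   P_1 = sorted(set(P_1))
--
--   P_2 = [1]
--   for p in F_2:
--     P_2.extend([x * p for x in set(P_2)])
--   P_2 = sorted(set(P_2), reverse=True)
--
--   return P_1, P_2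
-- ===== SOURCE B (Python) =====
-- def sub_products(factors):
--     # Enumerate every include/exclude choice per factor recursively, then dedup and sort.
--     L = len(factors) // 2
--
--     def choice_products(half):
--         if not half:
--             return [1]
--         rest = choice_products(half[1:])
--         return [c * x for c in (1, half[0]) for x in rest]
--
--     return (sorted(set(choice_products(factors[:L]))),
--             sorted(set(choice_products(factors[L:])), reverse=True))
-- ===== Notes on version B (the rewrite author's own statement) =====
-- stated objective: simpler
-- what changed: Replaces the incremental doubling loop that repeatedly extends and re-dedups a growing list with a direct recursive enumeration of all include/exclude choice products, deduplicated and sorted once at the end.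
import Mathlib
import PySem

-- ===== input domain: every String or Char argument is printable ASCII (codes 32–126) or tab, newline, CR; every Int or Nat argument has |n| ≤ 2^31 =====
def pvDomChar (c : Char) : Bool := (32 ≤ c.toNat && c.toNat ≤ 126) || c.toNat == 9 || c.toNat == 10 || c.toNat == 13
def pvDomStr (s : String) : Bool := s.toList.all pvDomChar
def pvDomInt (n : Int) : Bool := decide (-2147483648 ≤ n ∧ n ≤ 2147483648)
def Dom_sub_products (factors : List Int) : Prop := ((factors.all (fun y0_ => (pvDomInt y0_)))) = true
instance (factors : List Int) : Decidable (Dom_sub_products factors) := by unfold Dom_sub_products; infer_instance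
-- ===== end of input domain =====

-- B replaces A's incremental doubling-with-dedup loop by a direct recursive enumeration of
-- all include/exclude choice products, deduplicated and sorted once (objective: simpler).

-- ===== PORT A =====
-- the loop body: P_1.extend([x * p for x in set(P_1)])
def pvStep (P : List Int) (p : Int) : List Int :=
  P ++ (PySem.Set.ofList P).map (fun x => x * p)

def sub_products (factors : List Int) : List Int × List Int :=
  let L : Int := PySem.Int.floordiv (factors.length : Int) 2
  let F1 := PySem.List.slice factors none (some L)
  let F2 := PySem.List.slice factors (some L) none
  let P1 := F1.foldl pvStep [1]
  let P1' := PySem.List.sorted (PySem.Set.ofList P1) (fun x => x) false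
  let P2 := F2.foldl pvStep [1]
  let P2' := PySem.List.sorted (PySem.Set.ofList P2) (fun x => x) true
  (P1', P2')

-- ===== PORT B =====
-- choice_products: [c * x for c in (1, half[0]) for x in choice_products(half[1:])]
def pvChoiceProducts : List Int → List Int
  | [] => [1]
  | p :: rest =>
    let r := pvChoiceProducts rest
    [1, p].flatMap (fun c => r.map (fun x => c * x))

def sub_products_alt (factors : List Int) : List Int × List Int :=
  let L : Int := PySem.Int.floordiv (factors.length : Int) 2
  let F1 := PySem.List.slice factors none (some L)
  let F2 := PySem.List.slice factors (some L) none
  (PySem.List.sorted (PySem.Set.ofList (pvChoiceProducts F1)) (fun x => x) false,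
   PySem.List.sorted (PySem.Set.ofList (pvChoiceProducts F2)) (fun x => x) true)

-- ===== PRECONDITION & SPEC =====
def Spec_sub_products (factors : List Int) (out : List Int × List Int) : Prop := out = sub_products_alt factors
instance (factors : List Int) (out : List Int × List Int) : Decidable (Spec_sub_products factors out) := by unfold Spec_sub_products; infer_instance

-- ===== CLAIM (what is proved, stated in full; the proofs are below) =====
def Claim_equal_sub_products : Prop := ∀ (factors : List Int), Dom_sub_products factors → Spec_sub_products factors (sub_products factors)

-- ===== LEMMAS AND PROOFS =====

-- membership in A's foldl over F starting from P: products y * z with y ∈ P, z a choice product of F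
theorem mem_foldl_pvStep (F : List Int) (P : List Int) (x : Int) :
    x ∈ F.foldl pvStep P ↔ ∃ y ∈ P, ∃ z ∈ pvChoiceProducts F, x = y * z := by
  induction F generalizing P with
  | nil =>
    simp [pvChoiceProducts]
  | cons p F ih =>
    simp only [List.foldl_cons, ih, pvChoiceProducts, pvStep]
    constructor
    · rintro ⟨y, hy, z, hz, rfl⟩
      rcases List.mem_append.mp hy with hy | hy
      · exact ⟨y, hy, 1 * z,
          List.mem_flatMap.mpr ⟨1, by simp, List.mem_map.mpr ⟨z, hz, rfl⟩⟩, by ring⟩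
      · rcases List.mem_map.mp hy with ⟨w, hw, rfl⟩
        rw [PySem.Set.mem_ofList] at hw
        exact ⟨w, hw, p * z,
          List.mem_flatMap.mpr ⟨p, by simp, List.mem_map.mpr ⟨z, hz, rfl⟩⟩, by ring⟩
    · rintro ⟨y, hy, z, hz, rfl⟩
      rcases List.mem_flatMap.mp hz with ⟨c, hc, hcz⟩
      rcases List.mem_map.mp hcz with ⟨z', hz', rfl⟩
      have hc' : c = 1 ∨ c = p := by simpa using hc
      rcases hc' with rfl | hcp
      · exact ⟨y, List.mem_append.mpr (Or.inl hy), z', hz', by ring⟩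
      · refine ⟨y * p, List.mem_append.mpr (Or.inr (List.mem_map.mpr
          ⟨y, by rw [PySem.Set.mem_ofList]; exact hy, rfl⟩)), z', hz', ?_⟩
        rw [hcp]; ring

theorem mem_foldl_iff_choice (F : List Int) (x : Int) :
    x ∈ F.foldl pvStep [1] ↔ x ∈ pvChoiceProducts F := by
  rw [mem_foldl_pvStep]
  constructor
  · rintro ⟨y, hy, z, hz, rfl⟩
    simp only [List.mem_singleton] at hy
    simpa [hy] using hz
  · intro hx
    exact ⟨1, by simp, x, hx, by ring⟩

theorem perm_ofList_foldl (F : List Int) :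
    (PySem.Set.ofList (F.foldl pvStep [1])).Perm (PySem.Set.ofList (pvChoiceProducts F)) := by
  apply (List.perm_ext_iff_of_nodup (PySem.Set.nodup_ofList _) (PySem.Set.nodup_ofList _)).mpr
  intro x
  simp [PySem.Set.mem_ofList, mem_foldl_iff_choice]

theorem sorted_false_eq (F : List Int) :
    PySem.List.sorted (PySem.Set.ofList (F.foldl pvStep [1])) (fun x => x) false
      = PySem.List.sorted (PySem.Set.ofList (pvChoiceProducts F)) (fun x => x) false :=
  PySem.List.sorted_eq_sorted_of_perm _ _ _ (fun _ _ h => h) (perm_ofList_foldl F)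

theorem sorted_true_eq (F : List Int) :
    PySem.List.sorted (PySem.Set.ofList (F.foldl pvStep [1])) (fun x => x) true
      = PySem.List.sorted (PySem.Set.ofList (pvChoiceProducts F)) (fun x => x) true := by
  apply PySem.List.sorted_rev_eq_of_perm_of_pairwise_gt
  · exact (PySem.List.sorted_perm _ _ _).trans (perm_ofList_foldl F).symm
  · have hnd : (PySem.List.sorted (PySem.Set.ofList (pvChoiceProducts F))
        (fun x : Int => x) true).Nodup :=
      (PySem.List.sorted_perm _ _ _).nodup_iff.mpr (PySem.Set.nodup_ofList _)
    have hge := PySem.List.sorted_pairwise_rev (PySem.Set.ofList (pvChoiceProducts F))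
      (fun x : Int => x) 
    exact (hnd.and hge).imp (fun h => lt_of_le_of_ne h.2 (Ne.symm h.1))

-- ===== VERDICT (by name: the statement is the Claim_ definition above) =====
theorem sub_products_spec : Claim_equal_sub_products := by
  intro factors _
  unfold Spec_sub_products sub_products sub_products_alt
  simp only []
  exact Prod.ext (sorted_false_eq _) (sorted_true_eq _)
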